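-- pv_equiv track=rewrite | github.com/CarlosBeiramar/LCC | 2ºAno/LA1/treino3/P_tutorial.py | validas
-- ===== SOURCE A (Python) =====
-- from itertools import combinations_with_replacement
--
-- def validas(soma,listas):
--     res = []
--     for lista in listas:
--         for x in range(1,len(lista)+1):
--             y=set([sum(comb) for comb in combinations_with_replacement(lista,x)])
--             if soma in y:
--                 res.append(lista)
--                 break
--             y.clear()
--     return res
-- ===== SOURCE B (Python) =====
-- def validas(soma, listas):
--     res = []
--     for lista in listas:
--         cur = {0}
--         for _ in range(len(lista)):
--             cur = {s + e for s in cur for e in lista}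
--             if soma in cur:
--                 res.append(lista)
--                 break
--     return res
-- ===== Notes on version B (the rewrite author's own statement) =====
-- stated objective: faster
-- what changed: Replaced per-size enumeration of all combinations_with_replacement (exponential in list length) by an incremental reachable-sum set DP: cur starts at {0} and is extended one element at a time, with early exit when soma becomes reachable.
import Mathlib
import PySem

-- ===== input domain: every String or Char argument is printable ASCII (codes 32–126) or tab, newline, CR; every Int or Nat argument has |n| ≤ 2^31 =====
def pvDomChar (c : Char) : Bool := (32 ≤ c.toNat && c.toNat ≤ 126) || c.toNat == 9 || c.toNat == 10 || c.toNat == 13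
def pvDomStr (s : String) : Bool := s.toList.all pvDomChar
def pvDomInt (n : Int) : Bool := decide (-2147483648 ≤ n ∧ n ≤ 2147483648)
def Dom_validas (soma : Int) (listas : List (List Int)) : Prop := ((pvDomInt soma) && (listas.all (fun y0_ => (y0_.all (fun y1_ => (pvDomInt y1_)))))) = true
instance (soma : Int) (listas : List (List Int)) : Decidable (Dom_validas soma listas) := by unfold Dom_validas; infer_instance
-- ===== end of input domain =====

-- B replaces A's per-size enumeration of every combination-with-replacement by an
-- incremental reachable-sum set DP with early exit (objective: faster, asymptotic).

-- ===== PORT A =====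
-- itertools.combinations_with_replacement(l, x), hand-ported (no PySem primitive);
-- exact element-for-element including itertools' lexicographic order.
def pvCwr : List Int → Nat → List (List Int)
  | _, 0 => [[]]
  | [], _ + 1 => []
  | a :: rest, x + 1 => ((pvCwr (a :: rest) x).map (a :: ·)) ++ pvCwr rest (x + 1)
  termination_by l x => l.length + x

-- A's inner 'for x in range(1, len(lista)+1): … break': recursion over the range
-- list, returning whether the break (append) fired.  'soma in y' is Set.contains;
-- x ≥ 1 on the range so x.toNat is exact.  y.clear() has no observable effect.
def pvALoop (soma : Int) (lista : List Int) : List Int → Bool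
  | [] => false
  | x :: xs =>
      let y : PySem.Set Int := PySem.Set.ofList ((pvCwr lista x.toNat).map List.sum)
      if PySem.Set.contains y soma then true else pvALoop soma lista xs

def validas (soma : Int) (listas : List (List Int)) : List (List Int) :=
  listas.foldl
    (fun res lista =>
      if pvALoop soma lista (PySem.List.pyRange 1 ((lista.length : Int) + 1) 1) then
        res ++ [lista]
      else res)
    []

-- ===== PORT B =====
-- {s + e for s in cur for e in lista} (result consumed only through membership /
-- further set building, so Python's set iteration order is immaterial).
def pvBStep (lista : List Int) (cur : PySem.Set Int) : PySem.Set Int :=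
  PySem.Set.ofList (cur.flatMap (fun s => lista.map (fun e => s + e)))

-- B's inner 'for _ in range(len(lista)): … break'
def pvBLoop (soma : Int) (lista : List Int) (cur : PySem.Set Int) : Nat → Bool
  | 0 => false
  | k + 1 =>
      let cur' := pvBStep lista cur
      if PySem.Set.contains cur' soma then true else pvBLoop soma lista cur' k

def validas_alt (soma : Int) (listas : List (List Int)) : List (List Int) :=
  listas.foldl
    (fun res lista =>
      if pvBLoop soma lista (PySem.Set.ofList [0]) lista.length then
        res ++ [lista]
      else res)
    []

-- ===== PRECONDITION & SPEC =====
def Spec_validas (soma : Int) (listas : List (List Int)) (out : List (List Int)) : Prop := out = validas_alt soma listas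
instance (soma : Int) (listas : List (List Int)) (out : List (List Int)) : Decidable (Spec_validas soma listas out) := by unfold Spec_validas; infer_instance

-- ===== CLAIM (what is proved, stated in full; the proofs are below) =====
def Claim_equal_validas : Prop := ∀ (soma : Int) (listas : List (List Int)), Dom_validas soma listas → Spec_validas soma listas (validas soma listas)

-- ===== LEMMAS AND PROOFS =====

-- "s is the sum of exactly k elements of l (with repetition)"
def pvTup (l : List Int) (k : Nat) (s : Int) : Prop :=
  ∃ ws : List Int, ws.length = k ∧ (∀ e ∈ ws, e ∈ l) ∧ ws.sum = s

theorem pvCwr_sound_aux (n : Nat) : ∀ (l : List Int) (k : Nat) (c : List Int),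
    l.length + k ≤ n → c ∈ pvCwr l k → c.length = k ∧ ∀ e ∈ c, e ∈ l := by
  induction n with
  | zero =>
      intro l k c hle hc
      have hk : k = 0 := by omega
      subst hk
      simp only [pvCwr, List.mem_singleton] at hc
      subst hc; simp
  | succ n ih =>
      intro l k c hle hc
      match k with
      | 0 =>
          simp only [pvCwr, List.mem_singleton] at hc
          subst hc; simp
      | k + 1 =>
          match l with
          | [] => simp [pvCwr] at hc
          | a :: rest =>
              simp only [pvCwr] at hc
              rcases List.mem_append.mp hc with h | h
              · rcases List.mem_map.mp h with ⟨c', hc', rfl⟩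
                obtain ⟨h1, h2⟩ := ih (a :: rest) k c' (by simp at hle ⊢; omega) hc'
                refine ⟨by simp [h1], ?_⟩
                intro e he
                rcases List.mem_cons.mp he with rfl | he'
                · exact List.mem_cons_self
                · exact h2 e he'
              · obtain ⟨h1, h2⟩ := ih rest (k + 1) c (by simp at hle ⊢; omega) h
                exact ⟨h1, fun e he => List.mem_cons_of_mem _ (h2 e he)⟩

theorem pvCwr_sound (l : List Int) (k : Nat) (c : List Int)
    (hc : c ∈ pvCwr l k) : c.length = k ∧ ∀ e ∈ c, e ∈ l :=
  pvCwr_sound_aux (l.length + k) l k c le_rfl hc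

theorem pvCwr_complete_aux (n : Nat) : ∀ (l ws : List Int) (k : Nat),
    l.length + k ≤ n → ws.length = k → (∀ e ∈ ws, e ∈ l) →
    ∃ c ∈ pvCwr l k, c.sum = ws.sum := by
  induction n with
  | zero =>
      intro l ws k hle hlen helem
      have hk : k = 0 := by omega
      subst hk
      have hws : ws = [] := List.length_eq_zero_iff.mp hlen
      subst hws
      exact ⟨[], by simp [pvCwr], rfl⟩
  | succ n ih =>
      intro l ws k hle hlen helem
      match k with
      | 0 =>
          have hws : ws = [] := List.length_eq_zero_iff.mp hlen
          subst hws
          exact ⟨[], by simp [pvCwr], rfl⟩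
      | k + 1 =>
          match l with
          | [] =>
              exfalso
              cases ws with
              | nil => simp at hlen
              | cons w ws' => exact absurd (helem w List.mem_cons_self) (by simp)
          | a :: rest =>
              by_cases hall : ∀ e ∈ ws, e ∈ rest
              · obtain ⟨c, hc, hs⟩ := ih rest ws (k + 1) (by simp at hle ⊢; omega) hlen hall
                exact ⟨c, by simp only [pvCwr, List.mem_append]; exact Or.inr hc, hs⟩
              · push Not at hall
                obtain ⟨e, hews, hnot⟩ := hall
                have hea : e = a := by
                  rcases List.mem_cons.mp (helem e hews) with h | h
                  · exact h
                  · exact absurd h hnot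
                subst hea
                have hlen' : (ws.erase e).length = k := by
                  rw [List.length_erase_of_mem hews, hlen]
                  omega
                have helem' : ∀ x ∈ ws.erase e, x ∈ e :: rest :=
                  fun x hx => helem x (List.mem_of_mem_erase hx)
                obtain ⟨c, hc, hs⟩ := ih (e :: rest) (ws.erase e) k
                  (by simp at hle ⊢; omega) hlen' helem'
                refine ⟨e :: c, ?_, ?_⟩
                · simp only [pvCwr, List.mem_append, List.mem_map]
                  exact Or.inl ⟨c, hc, rfl⟩
                · rw [List.sum_cons, hs, ← List.sum_erase hews]

theorem pvCwr_complete (k : Nat) (l ws : List Int)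
    (hlen : ws.length = k) (helem : ∀ e ∈ ws, e ∈ l) :
    ∃ c ∈ pvCwr l k, c.sum = ws.sum :=
  pvCwr_complete_aux (l.length + k) l ws k le_rfl hlen helem

theorem pvMemA (l : List Int) (k : Nat) (s : Int) :
    s ∈ (pvCwr l k).map List.sum ↔ pvTup l k s := by
  constructor
  · intro h
    rcases List.mem_map.mp h with ⟨c, hc, rfl⟩
    rcases pvCwr_sound l k c hc with ⟨h1, h2⟩
    exact ⟨c, h1, h2, rfl⟩
  · rintro ⟨ws, hl, he, rfl⟩
    rcases pvCwr_complete k l ws hl he with ⟨c, hc, hs⟩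
    exact List.mem_map.mpr ⟨c, hc, hs⟩

theorem pvTup_succ (l : List Int) (j : Nat) (s : Int) :
    pvTup l (j + 1) s ↔ ∃ t, pvTup l j t ∧ ∃ e ∈ l, s = t + e := by
  constructor
  · rintro ⟨ws, hl, he, rfl⟩
    cases ws with
    | nil => simp at hl
    | cons w ws' =>
        refine ⟨ws'.sum, ⟨ws', by simpa using hl, fun e h => he e (List.mem_cons_of_mem _ h), rfl⟩,
          w, he w List.mem_cons_self, ?_⟩
        simp [List.sum_cons]; ring
  · rintro ⟨t, ⟨ws, hl, he, rfl⟩, e, hel, rfl⟩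
    exact ⟨ws ++ [e], by simp [hl], by
      intro x hx
      rcases List.mem_append.mp hx with h | h
      · exact he x h
      · simpa using (List.mem_singleton.mp h ▸ hel), by simp⟩

theorem pvMemBStep (l : List Int) (cur : PySem.Set Int) (s : Int) :
    s ∈ pvBStep l cur ↔ ∃ t ∈ cur, ∃ e ∈ l, s = t + e := by
  unfold pvBStep
  rw [PySem.Set.mem_ofList]
  simp [List.mem_flatMap, eq_comm]

theorem pvContains_eq (s t : PySem.Set Int) (x : Int) (h : x ∈ s ↔ x ∈ t) :
    PySem.Set.contains s x = PySem.Set.contains t x := by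
  simp [PySem.Set.contains, h]

theorem pvLoop_eq (soma : Int) (l : List Int) : ∀ (m j : Nat) (cur : PySem.Set Int),
    (∀ s, s ∈ cur ↔ pvTup l j s) →
    pvBLoop soma l cur m
      = pvALoop soma l (PySem.List.pyRange ((j : Int) + 1) ((j : Int) + 1 + (m : Int)) 1) := by
  intro m
  induction m with
  | zero =>
      intro j cur hinv
      rw [PySem.List.pyRange_one_eq_nil (by omega)]
      rfl
  | succ m ih =>
      intro j cur hinv
      have hinv' : ∀ s, s ∈ pvBStep l cur ↔ pvTup l (j + 1) s := by
        intro s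
        rw [pvMemBStep, pvTup_succ]
        exact exists_congr fun t => and_congr_left fun _ => hinv t
      rw [PySem.List.pyRange_one_cons (by push_cast; omega)]
      simp only [pvALoop, pvBLoop]
      have htn : (((j : Int) + 1)).toNat = j + 1 := by omega
      have hcond : PySem.Set.contains
            (PySem.Set.ofList ((pvCwr l (((j : Int) + 1)).toNat).map List.sum)) soma
          = PySem.Set.contains (pvBStep l cur) soma := by
        apply pvContains_eq
        rw [htn, PySem.Set.mem_ofList, pvMemA, hinv' soma]
      rw [hcond]
      have hA : pvBLoop soma l (pvBStep l cur) m
          = pvALoop soma l (PySem.List.pyRange ((j : Int) + 1 + 1) ((j : Int) + 1 + ((m + 1 : Nat) : Int)) 1) := by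
        rw [ih (j + 1) (pvBStep l cur) hinv']
        congr 2 <;> (push_cast; ring)
      rw [← hA]

theorem pvPerList (soma : Int) (l : List Int) :
    pvALoop soma l (PySem.List.pyRange 1 ((l.length : Int) + 1) 1)
      = pvBLoop soma l (PySem.Set.ofList [0]) l.length := by
  have h := pvLoop_eq soma l l.length 0 (PySem.Set.ofList [0]) ?_
  · rw [h]
    have : ((0 : Nat) : Int) + 1 + (l.length : Int) = (l.length : Int) + 1 := by push_cast; ring
    rw [this]
    norm_num
  · intro s
    rw [PySem.Set.mem_ofList]
    constructor
    · intro hs; exact ⟨[], rfl, by simp, by simpa using (List.mem_singleton.mp hs).symm⟩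
    · rintro ⟨ws, hl, -, rfl⟩
      simp [List.length_eq_zero_iff.mp hl]

-- ===== VERDICT (by name: the statement is the Claim_ definition above) =====
theorem validas_spec : Claim_equal_validas := by
  intro soma listas _
  unfold Spec_validas validas validas_alt
  induction listas using List.reverseRecOn with
  | nil => rfl
  | append_singleton xs x ih =>
      simp only [List.foldl_append, List.foldl_cons, List.foldl_nil, pvPerList]
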